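-- pv_equiv track=rewrite | github.com/zhhgit/leetcode_solution_python | src/session1/q060_permutation_sequence/Solution1.py | getPosNumInVisited
-- ===== SOURCE A (Python) =====
-- def getPosNumInVisited(visited,pos):
--     count = 0
--     for i in range(0,len(visited)):
--         if (not visited[i]):
--             if pos == count + 1:
--                 visited[i] = True
--                 return str(i + 1)
--             else:
--                 count = count + 1
-- ===== SOURCE B (Python) =====
-- def getPosNumInVisited(visited, pos):
--     avail = [i for i in range(len(visited)) if not visited[i]]
--     if 1 <= pos <= len(avail):
--         idx = avail[pos - 1]
--         visited[idx] = True
--         return str(idx + 1)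
-- ===== Notes on version B (the rewrite author's own statement) =====
-- stated objective: simpler
-- what changed: Replaces the inline counter with an early return inside the scan by materializing the list of unvisited indices once and picking the pos-th entry directly with a range check.
import Mathlib
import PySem

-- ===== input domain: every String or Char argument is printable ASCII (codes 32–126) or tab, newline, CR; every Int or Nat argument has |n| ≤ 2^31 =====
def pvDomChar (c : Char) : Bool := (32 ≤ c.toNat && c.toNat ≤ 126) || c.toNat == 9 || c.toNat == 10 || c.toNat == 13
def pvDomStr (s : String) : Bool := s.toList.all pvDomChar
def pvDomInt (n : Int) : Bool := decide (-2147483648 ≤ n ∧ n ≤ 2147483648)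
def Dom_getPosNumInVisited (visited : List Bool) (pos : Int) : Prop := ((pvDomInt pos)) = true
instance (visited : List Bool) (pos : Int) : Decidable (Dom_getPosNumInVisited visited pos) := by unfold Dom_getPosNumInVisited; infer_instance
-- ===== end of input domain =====

-- B builds the list of unvisited indices once and picks the pos-th entry directly (simpler
-- decomposition instead of an inline counter); both A and B mutate `visited` identically in
-- Python, and the equivalence proved here is about the return value.

-- ===== PORT A =====
-- A's scan over range(0, len(visited)) with counter `count`, as structural recursion
-- carrying the current index i and count.
def getPosNumInVisitedGo (pos : Int) : List Bool → Nat → Int → Option String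
  | [], _, _ => none
  | v :: rest, i, count =>
    if !v then
      if pos = count + 1 then some (PySem.Int.toStr ((i : Int) + 1))
      else getPosNumInVisitedGo pos rest (i + 1) (count + 1)
    else getPosNumInVisitedGo pos rest (i + 1) count

def getPosNumInVisited (visited : List Bool) (pos : Int) : Option String :=
  getPosNumInVisitedGo pos visited 0 0

-- ===== PORT B =====
-- avail = [i for i in range(len(visited)) if not visited[i]]; if 1 <= pos <= len(avail): return str(avail[pos-1]+1)
def getPosNumInVisited_alt (visited : List Bool) (pos : Int) : Option String :=
  let avail := (List.range visited.length).filter (fun i => !(visited.getD i false))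
  if 1 ≤ pos ∧ pos ≤ (avail.length : Int) then
    (avail[(pos - 1).toNat]?).map (fun idx => PySem.Int.toStr ((idx : Int) + 1))
  else none

-- ===== PRECONDITION & SPEC =====
def Spec_getPosNumInVisited (visited : List Bool) (pos : Int) (out : Option String) : Prop := out = getPosNumInVisited_alt visited pos
instance (visited : List Bool) (pos : Int) (out : Option String) : Decidable (Spec_getPosNumInVisited visited pos out) := by unfold Spec_getPosNumInVisited; infer_instance

-- ===== CLAIM (what is proved, stated in full; the proofs are below) =====
def Claim_equal_getPosNumInVisited : Prop := ∀ (visited : List Bool) (pos : Int), Dom_getPosNumInVisited visited pos → Spec_getPosNumInVisited visited pos (getPosNumInVisited visited pos)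

-- ===== LEMMAS AND PROOFS =====

-- recursive characterisation of the list of unvisited indices, offset by i
def falseIdx : List Bool → Nat → List Nat
  | [], _ => []
  | v :: rest, i => if v then falseIdx rest (i + 1) else i :: falseIdx rest (i + 1)

theorem falseIdx_eq (xs : List Bool) (i : Nat) :
    falseIdx xs i
      = ((List.range xs.length).filter (fun k => !(xs.getD k false))).map (· + i) := by
  induction xs generalizing i with
  | nil => simp [falseIdx]
  | cons v rest ih =>
    simp only [falseIdx, List.length_cons, List.range_succ_eq_map,
      List.filter_cons, List.filter_map]
    cases v with
    | true =>
      simp only [List.getD_cons_zero, Bool.not_true]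
      rw [ih (i + 1)]
      simp [Function.comp_def, Nat.add_assoc, Nat.add_comm 1 i]
    | false =>
      simp only [List.getD_cons_zero, Bool.not_false]
      rw [ih (i + 1)]
      simp [Function.comp_def, Nat.add_assoc, Nat.add_comm 1 i]

theorem go_none (pos : Int) (xs : List Bool) (i : Nat) (count : Int)
    (h : pos ≤ count) : getPosNumInVisitedGo pos xs i count = none := by
  induction xs generalizing i count with
  | nil => rfl
  | cons v rest ih =>
    simp only [getPosNumInVisitedGo]
    cases v with
    | true => exact ih (i + 1) count h
    | false =>
      have hne : ¬ pos = count + 1 := by omega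
      simp only [Bool.not_false, if_neg hne]
      exact ih (i + 1) (count + 1) (by omega)

theorem go_eq_get (pos : Int) (xs : List Bool) (i : Nat) (count : Int)
    (h : count < pos) :
    getPosNumInVisitedGo pos xs i count
      = ((falseIdx xs i)[(pos - count - 1).toNat]?).map
          (fun j => PySem.Int.toStr ((j : Int) + 1)) := by
  induction xs generalizing i count with
  | nil => simp [getPosNumInVisitedGo, falseIdx]
  | cons v rest ih =>
    simp only [getPosNumInVisitedGo, falseIdx]
    cases v with
    | true => exact ih (i + 1) count h
    | false =>
      by_cases he : pos = count + 1
      · have : (pos - count - 1).toNat = 0 := by omega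
        simp [he]
      · have h2 : count + 1 < pos := by omega
        have hidx : (pos - count - 1).toNat = (pos - (count + 1) - 1).toNat + 1 := by omega
        simp only [Bool.not_false, if_neg he, hidx]
        rw [ih (i + 1) (count + 1) h2]
        simp

theorem getElem?_none_of_ge {α : Type} (l : List α) (n : Nat) (h : l.length ≤ n) :
    l[n]? = none := by
  exact List.getElem?_eq_none h

-- ===== VERDICT (by name: the statement is the Claim_ definition above) =====
theorem getPosNumInVisited_spec : Claim_equal_getPosNumInVisited := by
  intro visited pos _
  show getPosNumInVisited visited pos = getPosNumInVisited_alt visited pos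
  unfold getPosNumInVisited getPosNumInVisited_alt
  set avail := (List.range visited.length).filter (fun k => !(visited.getD k false)) with havail
  by_cases h1 : 1 ≤ pos
  · rw [go_eq_get pos visited 0 0 (by omega)]
    have hfi : falseIdx visited 0 = avail := by
      rw [falseIdx_eq]; simp [havail]
    rw [hfi]
    by_cases h2 : pos ≤ (avail.length : Int)
    · rw [if_pos (show 1 ≤ pos ∧ pos ≤ (avail.length : Int) from ⟨h1, h2⟩)]
      have : pos - 0 - 1 = pos - 1 := by omega
      rw [this]
    · rw [if_neg (show ¬(1 ≤ pos ∧ pos ≤ (avail.length : Int)) from fun hc => h2 hc.2)]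
      rw [getElem?_none_of_ge _ _ (by omega)]
      rfl
  · rw [go_none pos visited 0 0 (by omega)]
    rw [if_neg (show ¬(1 ≤ pos ∧ pos ≤ (avail.length : Int)) from fun hc => h1 hc.1)]
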